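-- pv_equiv track=rewrite | github.com/IgrMd/yandex-algos-training | Тренировки по алгоритмам 6.0/Лекция 2. Префиксные суммы и два указателя/G.py | good_string
-- ===== SOURCE A (Python) =====
-- def good_string(n, c, s: str):
--     ans = 0
--     a = 0
--     b = 0
--     r = 0
--     curr_rudeness = 0
--     for l in range(n):
--         while r < n and curr_rudeness <= c:
--             if s[r] == 'a':
--                 a += 1
--             if s[r] == 'b':
--                 b += 1
--                 curr_rudeness += a
--             r += 1
--         if curr_rudeness > c:
--             ans = max(ans, r - l - 1)
--         else:
--             ans = max(ans, r - l)
--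
--         if s[l] == 'a':
--             curr_rudeness -= b
--             a -= 1
--         if s[l] == 'b':
--             b -= 1
--     return ans
-- ===== SOURCE B (Python) =====
-- def good_string(n, c, s: str):
--     # Alternative algorithm: prefix sums + per-left-endpoint binary search,
--     # instead of A's stateful two-pointer sweep.
--     # rudeness(s[l:r]) = P[r]-P[l]-A[l]*(B[r]-B[l]) where
--     # P = prefix rudeness, A/B = prefix counts of 'a'/'b'; rudeness is monotone
--     # in r, so the largest good r for each l is found by binary search.
--     P = [0]
--     A = [0]
--     B = [0]
--     for i in range(n):
--         ch = s[i]
--         P.append(P[-1] + (A[-1] if ch == 'b' else 0))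
--         A.append(A[-1] + (1 if ch == 'a' else 0))
--         B.append(B[-1] + (1 if ch == 'b' else 0))
--
--     def rud(l, r):
--         return P[r] - P[l] - A[l] * (B[r] - B[l])
--
--     ans = 0
--     for l in range(n):
--         lo, hi = l, n
--         while lo < hi:
--             mid = (lo + hi + 1) // 2
--             if rud(l, mid) <= c:
--                 lo = mid
--             else:
--                 hi = mid - 1
--         ans = max(ans, lo - l)
--     return ans
-- ===== Notes on version B (the rewrite author's own statement) =====
-- stated objective: alternative
-- what changed: Replaces A's stateful two-pointer sweep with prefix sums of rudeness/'a'/'b' counts plus, for each left endpoint, a binary search for the largest right endpoint whose window rudeness stays within c.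
import Mathlib
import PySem

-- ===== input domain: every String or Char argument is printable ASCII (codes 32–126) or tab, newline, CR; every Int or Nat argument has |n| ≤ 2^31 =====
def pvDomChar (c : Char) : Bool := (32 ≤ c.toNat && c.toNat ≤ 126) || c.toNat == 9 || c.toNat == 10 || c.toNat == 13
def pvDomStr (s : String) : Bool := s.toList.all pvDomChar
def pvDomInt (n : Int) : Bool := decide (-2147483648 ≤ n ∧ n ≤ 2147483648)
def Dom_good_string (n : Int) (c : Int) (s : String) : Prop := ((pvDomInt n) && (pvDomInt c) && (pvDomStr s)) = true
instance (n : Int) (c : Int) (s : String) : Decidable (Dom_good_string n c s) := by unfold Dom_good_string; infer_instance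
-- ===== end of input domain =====

-- B replaces A's stateful two-pointer sweep by prefix sums plus a per-left-endpoint binary search (an alternative algorithm, same results; not faster).


-- ===== PORT A =====
-- A's inner `while r < n and curr_rudeness <= c` loop; fuel = (n - r).toNat encodes `r < n`.
def aWhile (cs : List Char) (cc : Int) (fuel : Nat) (a b rud r : Int) :
    Int × Int × Int × Int :=
  match fuel with
  | 0 => (a, b, rud, r)
  | fuel + 1 =>
    if rud ≤ cc then
      let ch := cs.getD r.toNat ' '
      let a' := if ch = 'a' then a + 1 else a
      let b' := if ch = 'b' then b + 1 else b
      let rud' := if ch = 'b' then rud + a' else rud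
      aWhile cs cc fuel a' b' rud' (r + 1)
    else (a, b, rud, r)

def good_string (n : Int) (c : Int) (s : String) : Int :=
  let cs := s.toList
  let st := (PySem.List.pyRange 0 n 1).foldl
    (fun (st : Int × Int × Int × Int × Int) l =>
      let (ans, a, b, r, rud) := st
      let (a1, b1, rud1, r1) := aWhile cs c (n - r).toNat a b rud r
      let ans1 := if rud1 > c then max ans (r1 - l - 1) else max ans (r1 - l)
      let ch := cs.getD l.toNat ' '
      let rud2 := if ch = 'a' then rud1 - b1 else rud1
      let a2 := if ch = 'a' then a1 - 1 else a1
      let b2 := if ch = 'b' then b1 - 1 else b1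
      (ans1, a2, b2, r1, rud2))
    (0, 0, 0, 0, 0)
  st.1

-- ===== PORT B =====
-- prefix lists are built newest-first (Python's P[-1] is the head) and reversed at the end
def bPrefix (cs : List Char) (n : Int) : List Int × List Int × List Int :=
  let st := (PySem.List.pyRange 0 n 1).foldl
    (fun (st : List Int × List Int × List Int) i =>
      let (P, A, B) := st
      let ch := cs.getD i.toNat ' '
      let p := P.headD 0
      let a := A.headD 0
      let b := B.headD 0
      ((p + if ch = 'b' then a else 0) :: P,
       (a + if ch = 'a' then 1 else 0) :: A,
       (b + if ch = 'b' then 1 else 0) :: B))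
    ([0], [0], [0])
  (st.1.reverse, st.2.1.reverse, st.2.2.reverse)

def bRud (P A B : List Int) (l r : Int) : Int :=
  P.getD r.toNat 0 - P.getD l.toNat 0 - A.getD l.toNat 0 * (B.getD r.toNat 0 - B.getD l.toNat 0)

-- the `while lo < hi` binary search; fuel = (hi - lo).toNat bounds the iterations
def bSearch (P A B : List Int) (cc : Int) (l : Int) (fuel : Nat) (lo hi : Int) : Int :=
  match fuel with
  | 0 => lo
  | fuel + 1 =>
    if lo < hi then
      let mid := PySem.Int.floordiv (lo + hi + 1) 2
      if bRud P A B l mid ≤ cc then bSearch P A B cc l fuel mid hi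
      else bSearch P A B cc l fuel lo (mid - 1)
    else lo

def good_string_alt (n : Int) (c : Int) (s : String) : Int :=
  let cs := s.toList
  let (P, A, B) := bPrefix cs n
  (PySem.List.pyRange 0 n 1).foldl
    (fun ans l => max ans (bSearch P A B c l (n - l).toNat l n - l)) 0

-- ===== PRECONDITION & SPEC =====
-- Pre_ excludes n > len(s), where Python A raises IndexError (s[l] / s[r] out of range).
def Pre_good_string (n : Int) (c : Int) (s : String) : Prop := n ≤ (s.toList.length : Int)
instance (n : Int) (c : Int) (s : String) : Decidable (Pre_good_string n c s) := by
  unfold Pre_good_string; infer_instance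

def pvWitness_good_string : Int × Int × String := (6, 2, "abbaba")

def Spec_good_string (n : Int) (c : Int) (s : String) (out : Int) : Prop := out = good_string_alt n c s
instance (n : Int) (c : Int) (s : String) (out : Int) : Decidable (Spec_good_string n c s out) := by
  unfold Spec_good_string; infer_instance

-- ===== CLAIM (what is proved, stated in full; the proofs are below) =====
def Claim_equal_good_string : Prop := ∀ (n : Int) (c : Int) (s : String),
  Dom_good_string n c s → Pre_good_string n c s → Spec_good_string n c s (good_string n c s)

-- ===== LEMMAS AND PROOFS =====

def cntA (w : List Char) : Int := (w.countP (fun x => x = 'a') : Int)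
def cntB (w : List Char) : Int := (w.countP (fun x => x = 'b') : Int)
def rude : List Char → Int
  | [] => 0
  | x :: w => (if x = 'a' then cntB w else 0) + rude w

def win (cs : List Char) (l r : Int) : List Char := (cs.drop l.toNat).take (r - l).toNat

theorem cntA_nonneg (w : List Char) : 0 ≤ cntA w := by simp [cntA]
theorem cntB_nonneg (w : List Char) : 0 ≤ cntB w := by simp [cntB]
theorem cntA_cons (x : Char) (w : List Char) :
    cntA (x :: w) = (if x = 'a' then 1 else 0) + cntA w := by
  by_cases h : x = 'a' <;> simp [cntA, List.countP_cons, h] <;> push_cast <;> ring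
theorem cntB_cons (x : Char) (w : List Char) :
    cntB (x :: w) = (if x = 'b' then 1 else 0) + cntB w := by
  by_cases h : x = 'b' <;> simp [cntB, List.countP_cons, h] <;> push_cast <;> ring
theorem cntA_append (w v : List Char) : cntA (w ++ v) = cntA w + cntA v := by
  simp [cntA, List.countP_append]
theorem cntB_append (w v : List Char) : cntB (w ++ v) = cntB w + cntB v := by
  simp [cntB, List.countP_append]

theorem rude_nonneg (w : List Char) : 0 ≤ rude w := by
  induction w with
  | nil => simp [rude]
  | cons x w ih => simp only [rude]; have := cntB_nonneg w; split_ifs <;> omega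

theorem rude_append_singleton (w : List Char) (x : Char) :
    rude (w ++ [x]) = rude w + (if x = 'b' then cntA w else 0) := by
  induction w with
  | nil => simp [rude, cntA, cntB]
  | cons y w ih =>
    simp only [List.cons_append, rude, ih, cntB_append, cntA_cons, cntB_cons]
    have h1 := cntB_nonneg w
    split_ifs <;> simp_all [cntB] <;> ring

theorem rude_append_le (w v : List Char) : rude w ≤ rude (w ++ v) := by
  induction v using List.reverseRecOn with
  | nil => simp
  | append_singleton v x ih =>
    have h := rude_append_singleton (w ++ v) x
    have h2 := cntA_nonneg (w ++ v)
    rw [← List.append_assoc] at *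
    split_ifs at h <;> omega

theorem win_eq_nil (cs : List Char) (l r : Int) (h : r ≤ l) : win cs l r = [] := by
  have : (r - l).toNat = 0 := by omega
  simp [win, this]

theorem win_split (cs : List Char) (l r1 r2 : Int) (h1 : l ≤ r1) (h2 : r1 ≤ r2) :
    win cs l r2 = win cs l r1 ++ ((cs.drop l.toNat).drop (r1 - l).toNat).take ((r2 - l).toNat - (r1 - l).toNat) := by
  have : (r2 - l).toNat = (r1 - l).toNat + ((r2 - l).toNat - (r1 - l).toNat) := by omega
  rw [win, this, List.take_add]; simp [win]

theorem rude_win_mono (cs : List Char) (l r1 r2 : Int) (h1 : l ≤ r1) (h2 : r1 ≤ r2) :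
    rude (win cs l r1) ≤ rude (win cs l r2) := by
  rw [win_split cs l r1 r2 h1 h2]; exact rude_append_le _ _

theorem win_succ_right (cs : List Char) (l r : Int) (h0 : 0 ≤ l) (h1 : l ≤ r)
    (h2 : r < (cs.length : Int)) :
    win cs l (r + 1) = win cs l r ++ [cs.getD r.toNat ' '] := by
  have hn : (r + 1 - l).toNat = (r - l).toNat + 1 := by omega
  rw [win, hn, List.take_succ, win]
  have hlt : l.toNat + (r - l).toNat < cs.length := by omega
  have hidx : l.toNat + (r - l).toNat = r.toNat := by omega
  have hget : (cs.drop l.toNat)[(r - l).toNat]? = some (cs.getD r.toNat ' ') := by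
    rw [List.getElem?_drop, hidx, List.getElem?_eq_getElem (by omega : r.toNat < cs.length),
      List.getD_eq_getElem cs ' ' (by omega : r.toNat < cs.length)]
  rw [hget]; rfl

theorem win_cons (cs : List Char) (l r : Int) (h0 : 0 ≤ l) (h1 : l < r)
    (h2 : l < (cs.length : Int)) :
    win cs l r = cs.getD l.toNat ' ' :: win cs (l + 1) r := by
  have hlt : l.toNat < cs.length := by omega
  rw [win, List.drop_eq_getElem_cons hlt]
  have hn : (r - l).toNat = (r - (l + 1)).toNat + 1 := by omega
  have hl1 : (l + 1).toNat = l.toNat + 1 := by omega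
  rw [hn, List.take_succ_cons, win, hl1]
  congr 1
  rw [List.getD_eq_getElem cs ' ' hlt]
-- continues lem1
def GS (cs : List Char) (cc n l ρ : Int) : Prop :=
  l ≤ ρ ∧ ρ ≤ n ∧ rude (win cs l ρ) ≤ cc ∧ (ρ = n ∨ cc < rude (win cs l (ρ + 1)))

theorem GS_uniq (cs : List Char) (cc n l ρ1 ρ2 : Int)
    (h1 : GS cs cc n l ρ1) (h2 : GS cs cc n l ρ2) : ρ1 = ρ2 := by
  obtain ⟨a1, b1, c1, d1⟩ := h1
  obtain ⟨a2, b2, c2, d2⟩ := h2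
  by_contra hne
  rcases lt_trichotomy ρ1 ρ2 with h | h | h
  · rcases d1 with rfl | d1
    · omega
    · have := rude_win_mono cs l (ρ1 + 1) ρ2 (by omega) (by omega); omega
  · omega
  · rcases d2 with rfl | d2
    · omega
    · have := rude_win_mono cs l (ρ2 + 1) ρ1 (by omega) (by omega); omega

-- A's inner while loop, characterized.
theorem aWhile_spec (cs : List Char) (cc n : Int) (hn : n ≤ (cs.length : Int)) (hc : 0 ≤ cc)
    (l : Int) (hl : 0 ≤ l) :
    ∀ (fuel : Nat) (a b rud r : Int),
    fuel = (n - r).toNat → l ≤ r → r ≤ n →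
    a = cntA (win cs l r) → b = cntB (win cs l r) → rud = rude (win cs l r) →
    (r = l ∨ rude (win cs l (r - 1)) ≤ cc) →
    (aWhile cs cc fuel a b rud r).1 = cntA (win cs l (aWhile cs cc fuel a b rud r).2.2.2) ∧
    (aWhile cs cc fuel a b rud r).2.1 = cntB (win cs l (aWhile cs cc fuel a b rud r).2.2.2) ∧
    (aWhile cs cc fuel a b rud r).2.2.1 = rude (win cs l (aWhile cs cc fuel a b rud r).2.2.2) ∧
    (aWhile cs cc fuel a b rud r).2.2.2 ≤ n ∧
    ((cc < (aWhile cs cc fuel a b rud r).2.2.1 ∧ l < (aWhile cs cc fuel a b rud r).2.2.2 ∧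
        GS cs cc n l ((aWhile cs cc fuel a b rud r).2.2.2 - 1)) ∨
      ((aWhile cs cc fuel a b rud r).2.2.1 ≤ cc ∧ (aWhile cs cc fuel a b rud r).2.2.2 = n ∧
        GS cs cc n l n)) := by
  intro fuel
  induction fuel with
  | zero =>
    intro a b rud r hf hlr hrn ha hb hrud hgood
    have hrn' : r = n := by omega
    have heq : aWhile cs cc 0 a b rud r = (a, b, rud, r) := rfl
    rw [heq]; dsimp only
    refine ⟨ha, hb, hrud, hrn, ?_⟩
    by_cases hle : rud ≤ cc
    · exact Or.inr ⟨hle, hrn', ⟨by omega, le_refl _, by rw [← hrn', ← hrud]; exact hle, Or.inl rfl⟩⟩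
    · left
      have hlr' : l < r := by
        by_contra hh
        have : r = l := by omega
        rw [this, win_eq_nil cs l l (le_refl _)] at hrud
        simp [rude] at hrud; omega
      refine ⟨by omega, hlr', by omega, by omega, ?_, ?_⟩
      · rcases hgood with h | h
        · omega
        · exact h
      · right; have : r - 1 + 1 = r := by omega
        rw [this, ← hrud]; omega
  | succ fuel ih =>
    intro a b rud r hf hlr hrn ha hb hrud hgood
    have hrn' : r < n := by omega
    rw [aWhile]
    by_cases hle : rud ≤ cc
    · simp only [if_pos hle]
      have hrlen : r < (cs.length : Int) := by omega
      have hwin := win_succ_right cs l r hl hlr hrlen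
      set ch := cs.getD r.toNat ' ' with hch
      have ha' : (if ch = 'a' then a + 1 else a) = cntA (win cs l (r + 1)) := by
        rw [hwin, cntA_append, ha]; simp [cntA]; split_ifs <;> simp_all
      have hb' : (if ch = 'b' then b + 1 else b) = cntB (win cs l (r + 1)) := by
        rw [hwin, cntB_append, hb]; simp [cntB]; split_ifs <;> simp_all
      have hrud' : (if ch = 'b' then rud + (if ch = 'a' then a + 1 else a) else rud) =
          rude (win cs l (r + 1)) := by
        rw [hwin, rude_append_singleton, hrud, ha]
        by_cases h : ch = 'b'
        · have h2 : ¬ ch = 'a' := by rw [h]; decide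
          simp [h]
        · simp [h]
      exact ih _ _ _ (r + 1) (by omega) (by omega) (by omega) ha' hb' hrud'
        (Or.inr (by rw [show r + 1 - 1 = r by omega, ← hrud]; exact hle))
    · simp only [if_neg hle]
      refine ⟨ha, hb, hrud, hrn, ?_⟩
      left
      have hlt : cc < rud := by omega
      have hlr' : l < r := by
        by_contra hh
        have : r = l := by omega
        rw [this, win_eq_nil cs l l (le_refl _)] at hrud
        simp [rude] at hrud; omega
      refine ⟨hlt, hlr', by omega, by omega, ?_, ?_⟩
      · rcases hgood with h | h
        · omega
        · exact h
      · right; have hr1 : r - 1 + 1 = r := by omega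
        rw [hr1, ← hrud]; omega

theorem take_decomp (cs : List Char) (a b : Nat) (hab : a ≤ b) :
    cs.take b = cs.take a ++ (cs.drop a).take (b - a) := by
  have h : b = a + (b - a) := by omega
  conv_lhs => rw [h]
  rw [List.take_add]

theorem take_succ_elem (cs : List Char) (b : Nat) (hb : b < cs.length) :
    cs.take (b + 1) = cs.take b ++ [cs.getD b ' '] := by
  rw [List.take_succ, List.getElem?_eq_getElem hb, List.getD_eq_getElem cs ' ' hb]
  rfl

theorem drop_take_succ_elem (cs : List Char) (a b : Nat) (hab : a ≤ b) (hb : b < cs.length) :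
    (cs.drop a).take (b + 1 - a) = (cs.drop a).take (b - a) ++ [cs.getD b ' '] := by
  have h1 : b + 1 - a = (b - a) + 1 := by omega
  rw [h1, List.take_succ, List.getElem?_drop]
  have h2 : a + (b - a) = b := by omega
  rw [h2, List.getElem?_eq_getElem hb, List.getD_eq_getElem cs ' ' hb]
  rfl

theorem form_nat (cs : List Char) (a b : Nat) (hab : a ≤ b) (hb : b ≤ cs.length) :
    rude (cs.take b) - rude (cs.take a) - cntA (cs.take a) * (cntB (cs.take b) - cntB (cs.take a)) =
      rude ((cs.drop a).take (b - a)) := by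
  induction b, hab using Nat.le_induction with
  | base => simp [Nat.sub_self, rude]
  | succ b hab ih =>
    have hb' : b < cs.length := by omega
    have ih' := ih (by omega)
    have hA : cntA (cs.take b) = cntA (cs.take a) + cntA ((cs.drop a).take (b - a)) := by
      rw [take_decomp cs a b hab, cntA_append]
    rw [take_succ_elem cs b hb', drop_take_succ_elem cs a b hab hb',
      rude_append_singleton, rude_append_singleton, cntB_append]
    have hB1 : cntB [cs.getD b ' '] = if cs.getD b ' ' = 'b' then 1 else 0 := by
      by_cases h : cs.getD b ' ' = 'b' <;> simp [cntB, h]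
    rw [hB1]
    by_cases hch : cs.getD b ' ' = 'b'
    · simp only [if_pos hch]; linear_combination ih' + hA
    · simp only [if_neg hch]; linear_combination ih'

def pfx (f : List Char → Int) (cs : List Char) : Nat → List Int
  | 0 => [0]
  | m + 1 => f (cs.take (m + 1)) :: pfx f cs m

theorem pfx_length (f : List Char → Int) (cs : List Char) (m : Nat) :
    (pfx f cs m).length = m + 1 := by
  induction m with
  | zero => rfl
  | succ m ih => simp [pfx, ih]

theorem pfx_headD (f : List Char → Int) (cs : List Char) (m : Nat) (hf0 : f [] = 0) :
    (pfx f cs m).headD 0 = f (cs.take m) := by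
  cases m with
  | zero => simp [pfx, hf0]
  | succ m => simp [pfx]

theorem pfx_rev_getD (f : List Char → Int) (cs : List Char) (m k : Nat) (hk : k ≤ m)
    (hf0 : f [] = 0) :
    (pfx f cs m).reverse.getD k 0 = f (cs.take k) := by
  induction m with
  | zero =>
    have : k = 0 := by omega
    subst this; simp [pfx, hf0]
  | succ m ih =>
    rw [pfx, List.reverse_cons]
    by_cases h : k ≤ m
    · rw [List.getD_append _ _ _ _ (by rw [List.length_reverse, pfx_length]; omega)]
      exact ih h
    · have hk1 : k = m + 1 := by omega
      subst hk1
      rw [List.getD_eq_getElem _ _ (by simp [pfx_length])]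
      rw [List.getElem_append_right (by simp [pfx_length])]
      simp [pfx_length]

theorem bPrefix_spec (cs : List Char) (n : Int) (hn : n.toNat ≤ cs.length) :
    bPrefix cs n =
      ((pfx rude cs n.toNat).reverse, (pfx cntA cs n.toNat).reverse, (pfx cntB cs n.toNat).reverse) := by
  unfold bPrefix
  rw [PySem.List.pyRange_one]
  have key : ∀ (m : Nat), m ≤ cs.length →
      ((List.range m).map (fun k : Nat => ((0 : Int) + k))).foldl
        (fun (st : List Int × List Int × List Int) i =>
          let (P, A, B) := st
          let ch := cs.getD i.toNat ' '
          let p := P.headD 0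
          let a := A.headD 0
          let b := B.headD 0
          ((p + if ch = 'b' then a else 0) :: P,
           (a + if ch = 'a' then 1 else 0) :: A,
           (b + if ch = 'b' then 1 else 0) :: B)) ([0], [0], [0]) =
      (pfx rude cs m, pfx cntA cs m, pfx cntB cs m) := by
    intro m
    induction m with
    | zero => intro _; rfl
    | succ m ih =>
      intro hm
      rw [List.range_succ, List.map_append, List.foldl_append, ih (by omega)]
      have hm' : m < cs.length := by omega
      have htn : ((0 : Int) + (m : Int)).toNat = m := by omega
      simp only [List.map_cons, List.map_nil, List.foldl_cons, List.foldl_nil, htn]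
      rw [pfx_headD rude cs m (by simp [rude]), pfx_headD cntA cs m (by simp [cntA]),
        pfx_headD cntB cs m (by simp [cntB])]
      have hrud : rude (cs.take m) + (if cs.getD m ' ' = 'b' then cntA (cs.take m) else 0) =
          rude (cs.take (m + 1)) := by
        rw [take_succ_elem cs m hm', rude_append_singleton]
      have hA : cntA (cs.take m) + (if cs.getD m ' ' = 'a' then 1 else 0) =
          cntA (cs.take (m + 1)) := by
        rw [take_succ_elem cs m hm', cntA_append]
        by_cases h : cs.getD m ' ' = 'a' <;> simp [cntA, h]
      have hB : cntB (cs.take m) + (if cs.getD m ' ' = 'b' then 1 else 0) =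
          cntB (cs.take (m + 1)) := by
        rw [take_succ_elem cs m hm', cntB_append]
        by_cases h : cs.getD m ' ' = 'b' <;> simp [cntB, h]
      simp only [pfx, hrud, hA, hB]
  have hnn : (n - 0).toNat = n.toNat := by omega
  rw [hnn]
  rw [key n.toNat hn]

theorem bRud_spec (cs : List Char) (n : Int) (hn : n.toNat ≤ cs.length)
    (l r : Int) (hl : 0 ≤ l) (hlr : l ≤ r) (hr : r ≤ n) :
    bRud (pfx rude cs n.toNat).reverse (pfx cntA cs n.toNat).reverse (pfx cntB cs n.toNat).reverse l r =
      rude (win cs l r) := by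
  have hrn : r.toNat ≤ n.toNat := by omega
  have hln : l.toNat ≤ n.toNat := by omega
  unfold bRud
  rw [pfx_rev_getD rude cs n.toNat r.toNat hrn (by simp [rude]),
    pfx_rev_getD rude cs n.toNat l.toNat hln (by simp [rude]),
    pfx_rev_getD cntA cs n.toNat l.toNat hln (by simp [cntA]),
    pfx_rev_getD cntB cs n.toNat r.toNat hrn (by simp [cntB]),
    pfx_rev_getD cntB cs n.toNat l.toNat hln (by simp [cntB])]
  have hwin : win cs l r = (cs.drop l.toNat).take (r.toNat - l.toNat) := by
    rw [win]; congr 1; omega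
  rw [hwin]
  exact form_nat cs l.toNat r.toNat (by omega) (by omega)

theorem bSearch_spec (cs : List Char) (P A B : List Int) (cc n : Int) (hc : 0 ≤ cc)
    (l : Int) (hl0 : 0 ≤ l)
    (hbr : ∀ x : Int, l ≤ x → x ≤ n → bRud P A B l x = rude (win cs l x)) :
    ∀ (fuel : Nat) (lo hi : Int), l ≤ lo → lo ≤ hi → hi ≤ n → hi - lo ≤ fuel →
    rude (win cs l lo) ≤ cc → (hi = n ∨ cc < rude (win cs l (hi + 1))) →
    GS cs cc n l (bSearch P A B cc l fuel lo hi) := by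
  intro fuel
  induction fuel with
  | zero =>
    intro lo hi h1 h2 h3 h4 h5 h6
    have : lo = hi := by omega
    subst this
    exact ⟨h1, h3, h5, h6⟩
  | succ fuel ih =>
    intro lo hi h1 h2 h3 h4 h5 h6
    rw [bSearch]
    by_cases hlt : lo < hi
    · simp only [if_pos hlt]
      have hmid : lo + 1 ≤ PySem.Int.floordiv (lo + hi + 1) 2 ∧
          PySem.Int.floordiv (lo + hi + 1) 2 ≤ hi := by
        have := PySem.Int.floordiv_two_mid_bounds (lo := lo + 1) (hi := hi) (by omega)
        rw [show lo + 1 + hi = lo + hi + 1 by ring] at this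
        exact this
      set mid := PySem.Int.floordiv (lo + hi + 1) 2 with hmiddef
      rw [hbr mid (by omega) (by omega)]
      by_cases hq : rude (win cs l mid) ≤ cc
      · simp only [if_pos hq]
        exact ih mid hi (by omega) (by omega) h3 (by omega) hq h6
      · simp only [if_neg hq]
        refine ih lo (mid - 1) h1 (by omega) (by omega) (by omega) h5 ?_
        right
        rw [show mid - 1 + 1 = mid by ring]
        omega
    · simp only [if_neg hlt]
      have : lo = hi := by omega
      subst this
      exact ⟨h1, h3, h5, h6⟩

theorem main_fold (cs : List Char) (cc n : Int) (hc : 0 ≤ cc) (hn : n ≤ (cs.length : Int))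
    (P A B : List Int)
    (hbr : ∀ l x : Int, 0 ≤ l → l ≤ x → x ≤ n → bRud P A B l x = rude (win cs l x)) :
    ∀ (k j : Nat) (ansA ansB a b rud r : Int),
    (j : Int) + k = n → ansA = ansB →
    (j : Int) ≤ r → r ≤ n →
    a = cntA (win cs j r) → b = cntB (win cs j r) → rud = rude (win cs j r) →
    (r = (j : Int) ∨ rude (win cs (j : Int) (r - 1)) ≤ cc) →
    (((List.range' j k).map (fun i : Nat => (i : Int))).foldl
      (fun (st : Int × Int × Int × Int × Int) l =>
        let (ans, a, b, r, rud) := st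
        let (a1, b1, rud1, r1) := aWhile cs cc (n - r).toNat a b rud r
        let ans1 := if rud1 > cc then max ans (r1 - l - 1) else max ans (r1 - l)
        let ch := cs.getD l.toNat ' '
        let rud2 := if ch = 'a' then rud1 - b1 else rud1
        let a2 := if ch = 'a' then a1 - 1 else a1
        let b2 := if ch = 'b' then b1 - 1 else b1
        (ans1, a2, b2, r1, rud2)) (ansA, a, b, r, rud)).1 =
    ((List.range' j k).map (fun i : Nat => (i : Int))).foldl
      (fun ans l => max ans (bSearch P A B cc l (n - l).toNat l n - l)) ansB := by
  intro k
  induction k with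
  | zero =>
    intro j ansA ansB a b rud r _ hAB _ _ _ _ _ _
    simpa using hAB
  | succ k ih =>
    intro j ansA ansB a b rud r hjk hAB hjr hrn ha hb hrud hgood
    have hjltn : (j : Int) < n := by push_cast at hjk ⊢; omega
    have hjlen : (j : Int) < (cs.length : Int) := by omega
    rw [List.range'_succ, List.map_cons, List.foldl_cons, List.foldl_cons]
    have hW := aWhile_spec cs cc n hn hc (j : Int) (by positivity)
      ((n - r).toNat) a b rud r rfl hjr hrn ha hb hrud hgood
    rcases he : aWhile cs cc (n - r).toNat a b rud r with ⟨a1, b1, rud1, r1⟩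
    rw [he] at hW
    dsimp only at hW
    dsimp only
    rw [he]
    dsimp only
    obtain ⟨ha1, hb1, hrud1, hr1n, hdisj⟩ := hW
    unfold GS at hdisj
    -- the common stop point ρ with GS
    obtain ⟨ρ, hρgs, hansA⟩ :
        ∃ ρ : Int, GS cs cc n (j : Int) ρ ∧
          (if rud1 > cc then max ansA (r1 - (j : Int) - 1) else max ansA (r1 - (j : Int))) =
            max ansA (ρ - (j : Int)) := by
      rcases hdisj with ⟨h1, h2, h3⟩ | ⟨h1, h2, h3⟩
      · exact ⟨r1 - 1, h3, by rw [if_pos h1]; ring_nf⟩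
      · refine ⟨r1, by rw [h2]; exact h3, by rw [if_neg (by omega)]⟩
    -- B's binary search finds the same ρ
    have hbs := bSearch_spec cs P A B cc n hc (j : Int) (by positivity)
      (fun x hx1 hx2 => hbr (j : Int) x (by positivity) hx1 hx2)
      ((n - (j : Int)).toNat) (j : Int) n (le_refl _) (by omega) (le_refl _) (by omega)
      (by rw [win_eq_nil cs _ _ (le_refl _)]; simpa [rude] using hc) (Or.inl rfl)
    have hρeq : bSearch P A B cc (j : Int) ((n - (j : Int)).toNat) (j : Int) n = ρ :=
      GS_uniq cs cc n (j : Int) _ ρ hbs hρgs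
    rw [hρeq, hansA, hAB]
    -- invariant for the next iteration
    have hjr1 : (j : Int) < r1 := by
      rcases hdisj with ⟨_, h2, _⟩ | ⟨_, h2, _⟩
      · exact h2
      · omega
    have hcons := win_cons cs (j : Int) r1 (by positivity) hjr1 hjlen
    have hconsA := cntA_cons (cs.getD (j : Int).toNat ' ') (win cs ((j : Int) + 1) r1)
    have hconsB := cntB_cons (cs.getD (j : Int).toNat ' ') (win cs ((j : Int) + 1) r1)
    have hconsR : rude (win cs (j : Int) r1) =
        (if cs.getD (j : Int).toNat ' ' = 'a' then cntB (win cs ((j : Int) + 1) r1) else 0) +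
          rude (win cs ((j : Int) + 1) r1) := by
      rw [hcons]; rfl
    set ch := cs.getD (j : Int).toNat ' ' with hch
    have hinv_a : (if ch = 'a' then a1 - 1 else a1) = cntA (win cs ((j : Int) + 1) r1) := by
      rw [ha1, hcons, hconsA]
      split_ifs <;> ring
    have hinv_b : (if ch = 'b' then b1 - 1 else b1) = cntB (win cs ((j : Int) + 1) r1) := by
      rw [hb1, hcons, hconsB]
      split_ifs <;> ring
    have hinv_rud : (if ch = 'a' then rud1 - b1 else rud1) = rude (win cs ((j : Int) + 1) r1) := by
      rw [hrud1, hconsR, hb1, hcons, hconsB]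
      by_cases hca : ch = 'a'
      · have hcb : ¬ ch = 'b' := by rw [hca]; decide
        simp [hca, hcb]
      · simp [hca]
    have hinv_good : r1 = ((j : Int) + 1) ∨ rude (win cs ((j : Int) + 1) (r1 - 1)) ≤ cc := by
      by_cases hr1j : r1 = (j : Int) + 1
      · exact Or.inl hr1j
      · right
        have hj1 : (j : Int) + 1 < r1 := by omega
        have hdrople : rude (win cs ((j : Int) + 1) (r1 - 1)) ≤ rude (win cs (j : Int) (r1 - 1)) := by
          have hcons2 := win_cons cs (j : Int) (r1 - 1) (by positivity) (by omega) hjlen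
          rw [hcons2]
          have hnn := cntB_nonneg (win cs ((j : Int) + 1) (r1 - 1))
          have hrr : rude (ch :: win cs ((j : Int) + 1) (r1 - 1)) =
              (if ch = 'a' then cntB (win cs ((j : Int) + 1) (r1 - 1)) else 0) +
                rude (win cs ((j : Int) + 1) (r1 - 1)) := rfl
          rw [hrr]
          split_ifs <;> omega
        have hlast : rude (win cs (j : Int) (r1 - 1)) ≤ cc := by
          rcases hdisj with ⟨_, _, _, h4, h5, _⟩ | ⟨h1', _, _⟩
          · exact h5
          · calc rude (win cs (j : Int) (r1 - 1)) ≤ rude (win cs (j : Int) r1) :=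
                rude_win_mono cs _ _ _ (by omega) (by omega)
            _ ≤ cc := by omega
        exact le_trans hdrople hlast
    have hjr1' : ((j + 1 : Nat) : Int) ≤ r1 := by push_cast; omega
    have hjk1 : ((j + 1 : Nat) : Int) + (k : Int) = n := by push_cast; push_cast at hjk; omega
    have hcast : ((j + 1 : Nat) : Int) = (j : Int) + 1 := by push_cast; ring
    have hgoal := ih (j + 1) (max ansB (ρ - (j : Int))) (max ansB (ρ - (j : Int)))
      (if ch = 'a' then a1 - 1 else a1) (if ch = 'b' then b1 - 1 else b1)
      (if ch = 'a' then rud1 - b1 else rud1) r1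
      hjk1 rfl hjr1' hr1n
      (by rw [hinv_a, hcast]) (by rw [hinv_b, hcast]) (by rw [hinv_rud, hcast])
      (by rw [hcast]; exact hinv_good)
    exact hgoal

theorem aWhile_stuck (cs : List Char) (cc : Int) (fuel : Nat) (a b rud r : Int)
    (h : ¬ rud ≤ cc) : aWhile cs cc fuel a b rud r = (a, b, rud, r) := by
  cases fuel with
  | zero => rfl
  | succ fuel => rw [aWhile, if_neg h]

theorem negA_fold (cs : List Char) (cc n : Int) (hc : cc < 0) :
    ∀ (k j : Nat) (a b rud : Int), 0 ≤ rud → b ≤ 0 →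
    (((List.range' j k).map (fun i : Nat => (i : Int))).foldl
      (fun (st : Int × Int × Int × Int × Int) l =>
        let (ans, a, b, r, rud) := st
        let (a1, b1, rud1, r1) := aWhile cs cc (n - r).toNat a b rud r
        let ans1 := if rud1 > cc then max ans (r1 - l - 1) else max ans (r1 - l)
        let ch := cs.getD l.toNat ' '
        let rud2 := if ch = 'a' then rud1 - b1 else rud1
        let a2 := if ch = 'a' then a1 - 1 else a1
        let b2 := if ch = 'b' then b1 - 1 else b1
        (ans1, a2, b2, r1, rud2)) (0, a, b, 0, rud)).1 = 0 := by
  intro k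
  induction k with
  | zero => intro j a b rud _ _; rfl
  | succ k ih =>
    intro j a b rud hrud hb
    rw [List.range'_succ, List.map_cons, List.foldl_cons]
    dsimp only
    rw [aWhile_stuck cs cc _ a b rud 0 (by omega)]
    dsimp only
    rw [if_pos (by omega : rud > cc)]
    have hmax : max 0 ((0 : Int) - (j : Int) - 1) = 0 := by
      have : (0 : Int) ≤ (j : Int) := by positivity
      omega
    rw [hmax]
    apply ih (j + 1)
    · have hbn := hb
      split_ifs <;> omega
    · split_ifs <;> omega

theorem bSearch_neg (cs : List Char) (P A B : List Int) (cc n : Int) (hc : cc < 0)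
    (l : Int) (hl0 : 0 ≤ l)
    (hbr : ∀ x : Int, l ≤ x → x ≤ n → bRud P A B l x = rude (win cs l x)) :
    ∀ (fuel : Nat) (lo hi : Int), l ≤ lo → hi ≤ n →
    bSearch P A B cc l fuel lo hi = lo := by
  intro fuel
  induction fuel with
  | zero => intro lo hi _ _; rfl
  | succ fuel ih =>
    intro lo hi h1 h2
    rw [bSearch]
    by_cases hlt : lo < hi
    · simp only [if_pos hlt]
      have hmid : lo + 1 ≤ PySem.Int.floordiv (lo + hi + 1) 2 ∧
          PySem.Int.floordiv (lo + hi + 1) 2 ≤ hi := by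
        have := PySem.Int.floordiv_two_mid_bounds (lo := lo + 1) (hi := hi) (by omega)
        rw [show lo + 1 + hi = lo + hi + 1 by ring] at this
        exact this
      set mid := PySem.Int.floordiv (lo + hi + 1) 2 with hmiddef
      rw [hbr mid (by omega) (by omega)]
      rw [if_neg (by have := rude_nonneg (win cs l mid); omega)]
      exact ih lo (mid - 1) h1 (by omega)
    · simp only [if_neg hlt]
theorem negB_fold (cs : List Char) (P A B : List Int) (cc n : Int) (hc : cc < 0)
    (hbr : ∀ l x : Int, 0 ≤ l → l ≤ x → x ≤ n → bRud P A B l x = rude (win cs l x)) :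
    ∀ (k j : Nat),
    ((List.range' j k).map (fun i : Nat => (i : Int))).foldl
      (fun ans l => max ans (bSearch P A B cc l (n - l).toNat l n - l)) 0 = 0 := by
  intro k
  induction k with
  | zero => intro j; rfl
  | succ k ih =>
    intro j
    rw [List.range'_succ, List.map_cons, List.foldl_cons]
    by_cases hjn : (j : Int) ≤ n
    · rw [bSearch_neg cs P A B cc n hc (j : Int) (by positivity)
        (fun x hx1 hx2 => hbr (j : Int) x (by positivity) hx1 hx2)
        _ (j : Int) n (le_refl _) (le_refl _)]
      simpa using ih (j + 1)
    · have hfuel : (n - (j : Int)).toNat = 0 := by omega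
      rw [hfuel]
      have : bSearch P A B cc (j : Int) 0 (j : Int) n = (j : Int) := rfl
      rw [this]
      simpa using ih (j + 1)

-- ===== VERDICT (by name: the statement is the Claim_ definition above) =====
theorem good_string_spec : Claim_equal_good_string := by
  intro n c s hdom hpre
  unfold Pre_good_string at hpre
  unfold Spec_good_string good_string good_string_alt
  dsimp only
  have hrange : PySem.List.pyRange 0 n 1 =
      (List.range' 0 n.toNat).map (fun i : Nat => (i : Int)) := by
    rw [PySem.List.pyRange_one]
    simp [List.range_eq_range']
  rw [hrange, bPrefix_spec s.toList n (by omega)]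
  dsimp only
  have hwin0 : win s.toList 0 0 = [] := win_eq_nil s.toList 0 0 (le_refl _)
  have hbr : ∀ l x : Int, 0 ≤ l → l ≤ x → x ≤ n →
      bRud (pfx rude s.toList n.toNat).reverse (pfx cntA s.toList n.toNat).reverse
        (pfx cntB s.toList n.toNat).reverse l x = rude (win s.toList l x) :=
    fun l x h1 h2 h3 => bRud_spec s.toList n (by omega) l x h1 h2 h3
  by_cases hn0 : n ≤ 0
  · have h0 : n.toNat = 0 := by omega
    rw [h0]
    rfl
  · by_cases hcc : 0 ≤ c
    · exact main_fold s.toList c n hcc hpre _ _ _ hbr n.toNat 0 0 0 0 0 0 0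
        (by push_cast; omega) rfl (le_refl _) (by omega)
        (by rw [Nat.cast_zero, hwin0]; simp [cntA])
        (by rw [Nat.cast_zero, hwin0]; simp [cntB])
        (by rw [Nat.cast_zero, hwin0]; simp [rude])
        (by left; rw [Nat.cast_zero])
    · rw [negA_fold s.toList c n (by omega) n.toNat 0 0 0 0 (le_refl _) (le_refl _),
        negB_fold s.toList _ _ _ c n (by omega) hbr n.toNat 0]
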